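-- pv_equiv track=rewrite | github.com/Veinar/cp2k77HackingAssistant | utilities/solver.py | check_sequences_in_combinations
-- ===== SOURCE A (Python) =====
-- def check_sequences_in_combinations(sequences, combinations, buffer_size):
--
--     # Check if there are multiple sequences or only one
--     # If one return sequence from args - no need to be analyzed anymore
--     if not isinstance(sequences[0], list):
--         return ['True']
--
--     # Projection of all combinations to String type
--     combi_as_str = list()
--     for i in range(0, len(combinations)):
--         temp = ""
--         for j in range(0, len(combinations[i])):
--             temp += combinations[i][j]
--         combi_as_str.append(temp)
--
--     # Projection of all sequences to String type
--     sequen_as_str = list()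
--     for i in range(0, len(sequences)):
--         temp = ""
--         for j in range(0, len(sequences[i])):
--             temp += sequences[i][j]
--         sequen_as_str.append(temp)
--
--     # Check if combinations is present in generated combinations
--     # True present in row indicates presence of sequence in combination so:
--     # If every is present, output row should be [True] times sequences length
--     # If none is present, output row should be [False] times sequences lenght
--     possible = list()
--     for i in range(0, len(combi_as_str)):
--         has_every = list()
--         for j in range(0, len(sequen_as_str)):
--             if sequen_as_str[j] in combi_as_str[i]:
--                 has_every.append('True')
--             else:
--                 has_every.append('False')
--         possible.append(has_every)
--
--     return possible
-- ===== SOURCE B (Python) =====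
-- def check_sequences_in_combinations(sequences, combinations, buffer_size):
--     # Single flat sequence: nothing to analyze (same guard as the original)
--     if not isinstance(sequences[0], list):
--         return ['True']
--     seq_strs = ["".join(s) for s in sequences]
--     lengths = set(len(s) for s in seq_strs)
--     result = []
--     for comb in combinations:
--         c = "".join(comb)
--         # index every substring of c whose length matches some sequence,
--         # then answer each sequence by one set lookup
--         subs = set()
--         for L in lengths:
--             for i in range(len(c) - L + 1):
--                 subs.add(c[i:i+L])
--         result.append(['True' if s in subs else 'False' for s in seq_strs])
--     return result
-- ===== Notes on version B (the rewrite author's own statement) =====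
-- stated objective: alternative
-- what changed: B builds, per combination, a hash set of all substrings whose length matches some sequence length and answers every sequence by one set lookup, replacing A's per-pair substring scans (the inner sequence-vs-combination scan disappears; the substring index costs more on long strings).
import Mathlib
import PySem

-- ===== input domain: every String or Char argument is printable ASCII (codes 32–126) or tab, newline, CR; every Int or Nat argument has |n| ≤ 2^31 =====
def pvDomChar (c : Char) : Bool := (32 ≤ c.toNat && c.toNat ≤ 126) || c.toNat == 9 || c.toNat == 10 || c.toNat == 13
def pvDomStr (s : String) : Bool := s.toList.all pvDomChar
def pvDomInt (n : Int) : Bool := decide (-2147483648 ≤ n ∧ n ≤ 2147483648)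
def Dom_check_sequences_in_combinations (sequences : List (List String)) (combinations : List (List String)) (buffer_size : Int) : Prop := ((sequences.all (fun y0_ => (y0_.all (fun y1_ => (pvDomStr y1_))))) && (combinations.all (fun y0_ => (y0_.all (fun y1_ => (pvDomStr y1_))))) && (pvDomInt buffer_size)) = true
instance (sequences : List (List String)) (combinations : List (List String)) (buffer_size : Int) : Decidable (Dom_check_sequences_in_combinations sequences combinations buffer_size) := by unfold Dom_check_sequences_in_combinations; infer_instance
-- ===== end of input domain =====

-- B indexes, per combination, a set of all substrings whose length matches some sequence length and
-- answers every sequence by one set lookup, instead of A's per-pair substring scans (alternative; same-order output).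

-- ===== PORT A =====
-- 'if not isinstance(sequences[0], list): return ['True']' — in the typed domain sequences[0],
-- when it exists, is always a list, so the branch never fires; sequences = [] makes the Python
-- raise IndexError and is excluded by Pre_ below.
-- Each 'for i in range(0, len(xs)): … xs[i] …' loop reads the elements of xs in order and is
-- ported as a fold over xs with the loop's accumulator.
def check_sequences_in_combinations (sequences : List (List String)) (combinations : List (List String)) (buffer_size : Int) : List (List String) :=
  let combi_as_str : List String :=
    combinations.foldl (fun acc row => acc ++ [row.foldl (fun temp s => temp ++ s) ""]) []
  let sequen_as_str : List String :=
    sequences.foldl (fun acc row => acc ++ [row.foldl (fun temp s => temp ++ s) ""]) []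
  combi_as_str.foldl (fun possible c =>
    possible ++ [sequen_as_str.foldl (fun has_every s =>
      has_every ++ [if PySem.Str.isIn s c then "True" else "False"]) []]) []

-- ===== PORT B =====
-- 'set(len(s) for s in seq_strs)' is PySem.Set.ofList; the set 'subs' is built by Set.add in the
-- two nested loops and only queried by membership afterwards, so set iteration order is irrelevant.
def check_sequences_in_combinations_alt (sequences : List (List String)) (combinations : List (List String)) (buffer_size : Int) : List (List String) :=
  let seq_strs : List String := sequences.map (fun s => PySem.Str.join "" s)
  let lengths : PySem.Set Int := PySem.Set.ofList (seq_strs.map (fun s => PySem.Str.len s))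
  combinations.foldl (fun result comb =>
    let c := PySem.Str.join "" comb
    let subs : PySem.Set String :=
      lengths.foldl (fun subs L =>
        (PySem.List.pyRange 0 (PySem.Str.len c - L + 1)).foldl
          (fun subs i => PySem.Set.add subs (PySem.Str.slice c (some i) (some (i + L)))) subs)
        PySem.Set.empty
    result ++ [seq_strs.map (fun s => if PySem.Set.contains subs s then "True" else "False")]) []

-- ===== PRECONDITION & SPEC =====
-- Pre_ excludes exactly sequences = [], on which the Python A raises IndexError at sequences[0].
def Pre_check_sequences_in_combinations (sequences : List (List String)) (combinations : List (List String)) (buffer_size : Int) : Prop := sequences ≠ []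
instance (sequences : List (List String)) (combinations : List (List String)) (buffer_size : Int) : Decidable (Pre_check_sequences_in_combinations sequences combinations buffer_size) := by unfold Pre_check_sequences_in_combinations; infer_instance

def pvWitness_check_sequences_in_combinations : List (List String) × List (List String) × Int := ([["a"], ["b", "c"]], [["a", "bc"], ["x"]], 0)

def Spec_check_sequences_in_combinations (sequences : List (List String)) (combinations : List (List String)) (buffer_size : Int) (out : List (List String)) : Prop := out = check_sequences_in_combinations_alt sequences combinations buffer_size
instance (sequences : List (List String)) (combinations : List (List String)) (buffer_size : Int) (out : List (List String)) : Decidable (Spec_check_sequences_in_combinations sequences combinations buffer_size out) := by unfold Spec_check_sequences_in_combinations; infer_instance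

-- ===== CLAIM (what is proved, stated in full; the proofs are below) =====
def Claim_equal_check_sequences_in_combinations : Prop := ∀ (sequences : List (List String)) (combinations : List (List String)) (buffer_size : Int), Dom_check_sequences_in_combinations sequences combinations buffer_size → Pre_check_sequences_in_combinations sequences combinations buffer_size → Spec_check_sequences_in_combinations sequences combinations buffer_size (check_sequences_in_combinations sequences combinations buffer_size)

-- ===== LEMMAS AND PROOFS =====

-- ''.join with empty separator is concatenation
theorem pv_join_empty_sep (ls : List (List Char)) : PySem.Chars.join [] ls = ls.flatten := by
  induction ls with
  | nil => simp [PySem.Chars.join_nil]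
  | cons p rest ih =>
    cases rest with
    | nil => simp [PySem.Chars.join_singleton]
    | cons q r => simp [PySem.Chars.join_cons_cons, ih]

theorem pv_concat_toList (row : List String) (acc : String) :
    (row.foldl (fun temp s => temp ++ s) acc).toList = acc.toList ++ (row.map String.toList).flatten := by
  induction row generalizing acc with
  | nil => simp
  | cons s rest ih => simp [List.foldl_cons, ih, String.toList_append]

-- the '+=' concatenation loop builds exactly ''.join(row)
theorem pv_concat_eq_join (row : List String) :
    row.foldl (fun temp s => temp ++ s) "" = PySem.Str.join "" row := by
  have h : (row.foldl (fun temp s => temp ++ s) "").toList = (PySem.Str.join "" row).toList := by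
    rw [pv_concat_toList, PySem.Str.toList_join]
    have he : "".toList = ([] : List Char) := rfl
    rw [he, pv_join_empty_sep]
    simp
  exact String.toList_inj.mp h

-- membership through a fold of Set.add
theorem pv_mem_foldl_add {α β : Type} [BEq β] [LawfulBEq β] (f : α → β) (xs : List α)
    (s0 : PySem.Set β) (y : β) :
    y ∈ xs.foldl (fun s a => PySem.Set.add s (f a)) s0 ↔ y ∈ s0 ∨ ∃ a ∈ xs, f a = y := by
  induction xs generalizing s0 with
  | nil => simp
  | cons x rest ih =>
    simp only [List.foldl_cons, ih, PySem.Set.mem_add, List.mem_cons]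
    constructor
    · rintro ((h | h) | ⟨a, ha, rfl⟩)
      · exact Or.inl h
      · exact Or.inr ⟨x, Or.inl rfl, h.symm⟩
      · exact Or.inr ⟨a, Or.inr ha, rfl⟩
    · rintro (h | ⟨a, (rfl | ha), rfl⟩)
      · exact Or.inl (Or.inl h)
      · exact Or.inl (Or.inr rfl)
      · exact Or.inr ⟨a, ha, rfl⟩

-- membership in the nested substring-indexing loops
theorem pv_mem_subs (lengths : List Int) (c : String) (s0 : PySem.Set String) (y : String) :
    y ∈ lengths.foldl (fun subs L =>
        (PySem.List.pyRange 0 (PySem.Str.len c - L + 1)).foldl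
          (fun subs i => PySem.Set.add subs (PySem.Str.slice c (some i) (some (i + L)))) subs) s0
      ↔ y ∈ s0 ∨ ∃ L ∈ lengths, ∃ i ∈ PySem.List.pyRange 0 (PySem.Str.len c - L + 1),
          PySem.Str.slice c (some i) (some (i + L)) = y := by
  induction lengths generalizing s0 with
  | nil => simp
  | cons L rest ih =>
    simp only [List.foldl_cons, ih, pv_mem_foldl_add, List.mem_cons]
    constructor
    · rintro ((h | h) | ⟨L', hL', h⟩)
      · exact Or.inl h
      · exact Or.inr ⟨L, Or.inl rfl, h⟩
      · exact Or.inr ⟨L', Or.inr hL', h⟩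
    · rintro (h | ⟨L', (rfl | hL'), h⟩)
      · exact Or.inl (Or.inl h)
      · exact Or.inl (Or.inr h)
      · exact Or.inr ⟨L', hL', h⟩

-- a slice c[i:i+L] with 0 ≤ i, 0 ≤ L is a substring of c, and every substring of length
-- L = len(s) arises as such a slice: set membership in 'subs' is exactly 'sub in c'
theorem pv_exists_slice_iff_isIn (c s : String) (lengths : List Int)
    (hmem : PySem.Str.len s ∈ lengths) (hpos : ∀ L ∈ lengths, 0 ≤ L) :
    (∃ L ∈ lengths, ∃ i ∈ PySem.List.pyRange 0 (PySem.Str.len c - L + 1),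
        PySem.Str.slice c (some i) (some (i + L)) = s)
      ↔ PySem.Str.isIn s c = true := by
  constructor
  · rintro ⟨L, hL, i, hi, hs⟩
    have hiR := PySem.List.mem_pyRange_one.mp hi
    have hL0 : 0 ≤ L := hpos L hL
    have h0i : 0 ≤ i := hiR.1
    have h0iL : 0 ≤ i + L := by omega
    rw [PySem.Str.isIn_iff_infix]
    have : (PySem.Str.slice c (some i) (some (i + L))).toList
        = ((c.toList.drop i.toNat).take ((i + L).toNat - i.toNat)) := by
      rw [PySem.Str.toList_slice, PySem.Chars.slice_eq_listSlice,
        PySem.List.slice_toNat c.toList h0i h0iL]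
    rw [← hs, this]
    exact ((List.take_prefix _ _).isInfix).trans ((List.drop_suffix _ _).isInfix)
  · intro h
    obtain ⟨pre, suf, hdecomp⟩ := (PySem.Str.isIn_iff_infix s c).mp h
    refine ⟨PySem.Str.len s, hmem, (pre.length : Int), ?_, ?_⟩
    · rw [PySem.List.mem_pyRange_one]
      have hc : c.toList.length = pre.length + s.toList.length + suf.length := by
        rw [← hdecomp]; simp; omega
      rw [PySem.Str.len_eq, PySem.Str.len_eq]
      omega
    · apply String.toList_inj.mp
      rw [PySem.Str.toList_slice, PySem.Chars.slice_eq_listSlice]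
      have h0 : (0 : Int) ≤ (pre.length : Int) := by positivity
      have h1 : (0 : Int) ≤ (pre.length : Int) + PySem.Str.len s := by
        rw [PySem.Str.len_eq]; positivity
      rw [PySem.List.slice_toNat c.toList h0 h1]
      have ht : ((pre.length : Int) + PySem.Str.len s).toNat - ((pre.length : Int)).toNat
          = s.toList.length := by
        rw [PySem.Str.len_eq]; omega
      rw [ht]
      have hd : (pre.length : Int).toNat = pre.length := by omega
      rw [hd, ← hdecomp, List.append_assoc, List.drop_left, List.take_left]

-- ===== VERDICT (by name: the statement is the Claim_ definition above) =====
theorem check_sequences_in_combinations_spec : Claim_equal_check_sequences_in_combinations := by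
  intro sequences combinations buffer_size _hdom _hpre
  unfold Spec_check_sequences_in_combinations
  unfold check_sequences_in_combinations check_sequences_in_combinations_alt
  simp only [PySem.List.foldl_append_singleton_eq_map, pv_concat_eq_join, List.nil_append,
    List.map_map]
  apply List.map_congr_left
  intro comb _
  simp only [Function.comp_apply]
  apply List.map_congr_left
  intro sq hsq
  simp only [Function.comp_apply]
  have hmem' : PySem.Str.len (PySem.Str.join "" sq) ∈
      PySem.Set.ofList ((sequences.map (fun s => PySem.Str.join "" s)).map
        (fun s => PySem.Str.len s)) := by
    rw [PySem.Set.mem_ofList, List.map_map]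
    exact List.mem_map_of_mem hsq
  have hpos : ∀ L ∈ PySem.Set.ofList ((sequences.map (fun s => PySem.Str.join "" s)).map
      (fun s => PySem.Str.len s)), 0 ≤ L := by
    intro L hL
    rw [PySem.Set.mem_ofList] at hL
    obtain ⟨t, _, rfl⟩ := List.mem_map.mp hL
    rw [PySem.Str.len_eq]; positivity
  have hiff := pv_exists_slice_iff_isIn (PySem.Str.join "" comb) (PySem.Str.join "" sq) _ hmem' hpos
  simp only [List.map_map] at hiff
  split_ifs with h1 h2 h3
  · rfl
  · exact absurd ((PySem.Set.contains_iff _ _).mpr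
      (by rw [pv_mem_subs]; exact Or.inr (hiff.mpr h1))) h2
  · have hin := (PySem.Set.contains_iff _ _).mp h3
    rw [pv_mem_subs] at hin
    rcases hin with h | h
    · simp [PySem.Set.empty] at h
    · exact absurd (hiff.mp h) h1
  · rfl
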